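-- pv_equiv track=rewrite | github.com/zjunlp/AutoAct | Scripts/filter_data.py | prompt_retrive
-- ===== SOURCE A (Python) =====
-- def prompt_retrive(prompt:str)->dict:
--     action=[]
--     thought=[]
--     obversation=[]
--     for line in prompt.split('\n'):
--         if line.startswith("Action"):
--             action.append(line[line.find(':')+1:].strip())
--         elif line.startswith("Thought"):
--             thought.append(line[line.find(':')+1:].strip())
--         elif line.startswith("Observation"):
--             obversation.append(line[line.find(':')+1:].strip())
--     return {"actions":action,"thoughts":thought,"observations":obversation}
-- ===== SOURCE B (Python) =====
-- def prompt_retrive(prompt: str) -> dict: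
--     lines = prompt.split('\n')
--
--     def collect(prefix):
--         return [line[line.find(':') + 1:].strip()
--                 for line in lines if line.startswith(prefix)]
--
--     return {"actions": collect("Action"),
--             "thoughts": collect("Thought"),
--             "observations": collect("Observation")}
-- ===== Notes on version B (the rewrite author's own statement) =====
-- stated objective: idiomatic
-- what changed: Replaces the single interleaved if/elif bucketing loop with three independent filter+extract comprehension passes over the split lines, one per category.
import Mathlib
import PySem

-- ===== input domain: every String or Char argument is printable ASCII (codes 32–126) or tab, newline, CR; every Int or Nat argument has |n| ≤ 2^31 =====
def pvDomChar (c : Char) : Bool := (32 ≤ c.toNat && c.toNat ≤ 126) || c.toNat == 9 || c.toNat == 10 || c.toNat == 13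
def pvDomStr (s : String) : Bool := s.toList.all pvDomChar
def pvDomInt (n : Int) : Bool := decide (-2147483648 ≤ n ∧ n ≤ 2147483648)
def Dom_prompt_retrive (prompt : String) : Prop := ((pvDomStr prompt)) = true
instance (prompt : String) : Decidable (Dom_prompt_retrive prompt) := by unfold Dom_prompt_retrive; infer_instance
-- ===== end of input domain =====

-- B replaces A's single interleaved if/elif bucketing loop with three independent
-- filter+extract passes over the lines (idiomatic decomposition; same cost).

-- ===== PORT A =====
-- line[line.find(':')+1:].strip()
def pvExtractA (line : String) : String :=
  PySem.Str.strip (PySem.Str.slice line (some (PySem.Str.find line ":" + 1)) none)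

-- the body of A's for-loop on the triple (action, thought, obversation)
def pvStepA (st : List String × List String × List String) (line : String) :
    List String × List String × List String :=
  if PySem.Str.startswith line "Action" then
    (st.1 ++ [pvExtractA line], st.2.1, st.2.2)
  else if PySem.Str.startswith line "Thought" then
    (st.1, st.2.1 ++ [pvExtractA line], st.2.2)
  else if PySem.Str.startswith line "Observation" then
    (st.1, st.2.1, st.2.2 ++ [pvExtractA line])
  else st

def prompt_retrive (prompt : String) : List (String × List String) :=
  let st := ((PySem.Str.split? prompt "\n").getD []).foldl pvStepA ([], [], [])
  [("actions", st.1), ("thoughts", st.2.1), ("observations", st.2.2)]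

-- ===== PORT B =====
-- one filter+extract pass for a given prefix
def pvCollect (lines : List String) (pfx : String) : List String :=
  (lines.filter (fun line => PySem.Str.startswith line pfx)).map
    (fun line => PySem.Str.strip (PySem.Str.slice line (some (PySem.Str.find line ":" + 1)) none))

def prompt_retrive_alt (prompt : String) : List (String × List String) :=
  let lines := (PySem.Str.split? prompt "\n").getD []
  [("actions", pvCollect lines "Action"),
   ("thoughts", pvCollect lines "Thought"),
   ("observations", pvCollect lines "Observation")]

-- ===== PRECONDITION & SPEC =====
def Spec_prompt_retrive (prompt : String) (out : List (String × List String)) : Prop := out = prompt_retrive_alt prompt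
instance (prompt : String) (out : List (String × List String)) : Decidable (Spec_prompt_retrive prompt out) := by unfold Spec_prompt_retrive; infer_instance

-- ===== CLAIM (what is proved, stated in full; the proofs are below) =====
def Claim_equal_prompt_retrive : Prop := ∀ (prompt : String), Dom_prompt_retrive prompt → Spec_prompt_retrive prompt (prompt_retrive prompt)

-- ===== LEMMAS AND PROOFS =====

-- a line matched by startswith has the prefix's first character as its own first character
theorem pv_sw_head (l p : String) (c : Char) (hc : p.toList.head? = some c)
    (h : PySem.Str.startswith l p = true) : l.toList.head? = some c := by
  rw [PySem.Str.startswith_eq, PySem.Chars.startswith_iff] at h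
  obtain ⟨t, ht⟩ := h
  cases hp : p.toList with
  | nil => simp [hp] at hc
  | cons x xs =>
    rw [hp] at hc ht
    simp at hc
    simp [← ht, hc]

-- the three prefixes are mutually exclusive (distinct first letters)
theorem pv_excl (l p q : String) (c d : Char) (hc : p.toList.head? = some c)
    (hd : q.toList.head? = some d) (hne : c ≠ d)
    (h : PySem.Str.startswith l p = true) : PySem.Str.startswith l q = false := by
  by_contra hq
  simp only [Bool.not_eq_false] at hq
  have h1 := pv_sw_head l p c hc h
  have h2 := pv_sw_head l q d hd hq
  rw [h1] at h2
  exact hne (Option.some.injEq .. ▸ h2)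

theorem pvCollect_cons (l : String) (ls : List String) (pfx : String) :
    pvCollect (l :: ls) pfx =
      (if PySem.Str.startswith l pfx then
        [PySem.Str.strip (PySem.Str.slice l (some (PySem.Str.find l ":" + 1)) none)] else []) ++
      pvCollect ls pfx := by
  simp [pvCollect, List.filter_cons]
  split_ifs <;> simp

-- loop invariant: the fold distributes into the three independent collections
theorem pv_loop (lines : List String) (a t o : List String) :
    lines.foldl pvStepA (a, t, o) =
      (a ++ pvCollect lines "Action", t ++ pvCollect lines "Thought",
       o ++ pvCollect lines "Observation") := by
  induction lines generalizing a t o with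
  | nil => simp [pvCollect]
  | cons l ls ih =>
    have hA : ("Action" : String).toList.head? = some 'A' := by decide
    have hT : ("Thought" : String).toList.head? = some 'T' := by decide
    have hO : ("Observation" : String).toList.head? = some 'O' := by decide
    simp only [List.foldl_cons, pvStepA, pvExtractA]
    by_cases h1 : PySem.Str.startswith l "Action"
    · have e1 := pv_excl l "Action" "Thought" 'A' 'T' hA hT (by decide) h1
      have e2 := pv_excl l "Action" "Observation" 'A' 'O' hA hO (by decide) h1
      simp at h1 e1 e2
      simp [h1, e1, e2, ih, pvCollect_cons]
    · by_cases h2 : PySem.Str.startswith l "Thought"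
      · have e1 := pv_excl l "Thought" "Observation" 'T' 'O' hT hO (by decide) h2
        simp at h1 h2 e1
        simp [h1, h2, e1, ih, pvCollect_cons]
      · by_cases h3 : PySem.Str.startswith l "Observation"
        · simp at h1 h2 h3
          simp [h1, h2, h3, ih, pvCollect_cons]
        · simp at h1 h2 h3
          simp [h1, h2, h3, ih, pvCollect_cons]

-- ===== VERDICT (by name: the statement is the Claim_ definition above) =====
theorem prompt_retrive_spec : Claim_equal_prompt_retrive := by
  intro prompt _
  unfold Spec_prompt_retrive prompt_retrive prompt_retrive_alt
  simp [pv_loop]
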